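-- pv_equiv track=rewrite | github.com/RudyMartin/compliance-qa | infrastructure/services/dynamic_credential_carrier.py | _has_credential_data
-- ===== SOURCE A (Python) =====
-- from typing import Dict, Any, Optional, List, Set
--
-- def _has_credential_data(config: Dict[str, Any]) -> bool:
--     """Check if config contains credential-like data"""
--     credential_indicators = [
--         'password', 'secret', 'key', 'token', 'credentials',
--         'access_key', 'api_key', 'auth', 'username'
--     ]
--
--     def check_nested(obj, depth=0):
--         if depth > 3:  # Prevent infinite recursion
--             return False
--
--         if isinstance(obj, dict):
--             for key, value in obj.items():
--                 key_lower = key.lower()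
--                 if any(indicator in key_lower for indicator in credential_indicators):
--                     return True
--                 if isinstance(value, dict):
--                     if check_nested(value, depth + 1):
--                         return True
--
--         return False
--
--     return check_nested(config)
-- ===== SOURCE B (Python) =====
-- from typing import Dict, Any, Optional, List, Set
--
-- def _has_credential_data(config: Dict[str, Any]) -> bool:
--     """Check if config contains credential-like data"""
--     credential_indicators = [
--         'password', 'secret', 'key', 'token', 'credentials',
--         'access_key', 'api_key', 'auth', 'username'
--     ]
--
--     def all_keys(obj, depth=0):
--         keys = []
--         if isinstance(obj, dict) and depth <= 3:
--             for k, v in obj.items():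
--                 keys.append(k)
--                 keys.extend(all_keys(v, depth + 1))
--         return keys
--
--     return any(ind in k.lower()
--                for k in all_keys(config)
--                for ind in credential_indicators)
-- ===== Notes on version B (the rewrite author's own statement) =====
-- stated objective: simpler
-- what changed: A's short-circuiting nested recursion with early returns is replaced by a two-phase decomposition: flatten all keys up to depth 3 into one list, then a single any() substring scan over that list.
import Mathlib
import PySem

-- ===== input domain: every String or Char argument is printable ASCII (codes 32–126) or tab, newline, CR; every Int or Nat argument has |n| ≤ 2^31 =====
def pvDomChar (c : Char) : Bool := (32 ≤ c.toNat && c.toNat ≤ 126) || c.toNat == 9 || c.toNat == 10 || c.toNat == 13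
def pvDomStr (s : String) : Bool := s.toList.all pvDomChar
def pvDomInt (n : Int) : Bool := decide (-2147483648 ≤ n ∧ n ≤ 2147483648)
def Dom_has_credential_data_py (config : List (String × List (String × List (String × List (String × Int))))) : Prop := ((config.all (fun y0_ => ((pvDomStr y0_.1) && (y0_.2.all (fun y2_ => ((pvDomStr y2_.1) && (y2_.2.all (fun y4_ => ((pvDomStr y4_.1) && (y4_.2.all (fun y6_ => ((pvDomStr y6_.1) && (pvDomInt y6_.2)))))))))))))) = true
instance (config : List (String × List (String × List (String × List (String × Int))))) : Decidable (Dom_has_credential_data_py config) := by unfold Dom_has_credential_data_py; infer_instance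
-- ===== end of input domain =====

-- B replaces A's short-circuiting nested recursion by a two-phase decomposition: flatten all keys (to depth 3) into one list, then a single `any` substring scan — objective: simpler.


-- the 9 credential indicators (same literal list in both Pythons)
def pvIndicators : List String :=
  ["password", "secret", "key", "token", "credentials",
   "access_key", "api_key", "auth", "username"]

-- any(indicator in key_lower for indicator in credential_indicators)
def pvAnyInd (keyLower : String) : Bool :=
  pvIndicators.any (fun ind => PySem.Str.isIn ind keyLower)

-- ===== PORT A =====
-- check_nested specialised to each nesting level of the typed config (the generic
-- Python helper becomes one function per level; 'depth' is kept as in the source).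
-- innermost level: values are ints, never dicts, so only keys are tested
def checkA3 : List (String × Int) → Bool
  | [] => false
  | (k, _) :: rest => if pvAnyInd (PySem.Str.lower k) then true else checkA3 rest

def checkNested3 (obj : List (String × Int)) (depth : Int) : Bool :=
  if depth > 3 then false else checkA3 obj

def checkA2 (depth : Int) : List (String × List (String × Int)) → Bool
  | [] => false
  | (k, v) :: rest =>
    if pvAnyInd (PySem.Str.lower k) then true
    else if checkNested3 v (depth + 1) then true else checkA2 depth rest

def checkNested2 (obj : List (String × List (String × Int))) (depth : Int) : Bool :=
  if depth > 3 then false else checkA2 depth obj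

def checkA1 (depth : Int) : List (String × List (String × List (String × Int))) → Bool
  | [] => false
  | (k, v) :: rest =>
    if pvAnyInd (PySem.Str.lower k) then true
    else if checkNested2 v (depth + 1) then true else checkA1 depth rest

def checkNested1 (obj : List (String × List (String × List (String × Int)))) (depth : Int) : Bool :=
  if depth > 3 then false else checkA1 depth obj

def checkA0 (depth : Int) : List (String × List (String × List (String × List (String × Int)))) → Bool
  | [] => false
  | (k, v) :: rest =>
    if pvAnyInd (PySem.Str.lower k) then true
    else if checkNested1 v (depth + 1) then true else checkA0 depth rest

def checkNested0 (obj : List (String × List (String × List (String × List (String × Int))))) (depth : Int) : Bool :=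
  if depth > 3 then false else checkA0 depth obj

def has_credential_data_py (config : List (String × List (String × List (String × List (String × Int))))) : Bool :=
  checkNested0 config 0

-- ===== PORT B =====
-- all_keys specialised to each nesting level (keys.append k ; keys.extend (all_keys v (depth+1)) ≙ flatMap)
def keysB3 (depth : Int) (obj : List (String × Int)) : List String :=
  if depth ≤ 3 then obj.flatMap (fun kv => [kv.1]) else []

def keysB2 (depth : Int) (obj : List (String × List (String × Int))) : List String :=
  if depth ≤ 3 then obj.flatMap (fun kv => kv.1 :: keysB3 (depth + 1) kv.2) else []

def keysB1 (depth : Int) (obj : List (String × List (String × List (String × Int)))) : List String :=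
  if depth ≤ 3 then obj.flatMap (fun kv => kv.1 :: keysB2 (depth + 1) kv.2) else []

def keysB0 (depth : Int) (obj : List (String × List (String × List (String × List (String × Int))))) : List String :=
  if depth ≤ 3 then obj.flatMap (fun kv => kv.1 :: keysB1 (depth + 1) kv.2) else []

def has_credential_data_py_alt (config : List (String × List (String × List (String × List (String × Int))))) : Bool :=
  (keysB0 0 config).any (fun k =>
    pvIndicators.any (fun ind => PySem.Str.isIn ind (PySem.Str.lower k)))

-- ===== PRECONDITION & SPEC =====
def Spec_has_credential_data_py (config : List (String × List (String × List (String × List (String × Int))))) (out : Bool) : Prop := out = has_credential_data_py_alt config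
instance (config : List (String × List (String × List (String × List (String × Int))))) (out : Bool) : Decidable (Spec_has_credential_data_py config out) := by unfold Spec_has_credential_data_py; infer_instance

-- ===== CLAIM (what is proved, stated in full; the proofs are below) =====
def Claim_equal_has_credential_data_py : Prop := ∀ (config : List (String × List (String × List (String × List (String × Int))))), Dom_has_credential_data_py config → Spec_has_credential_data_py config (has_credential_data_py config)

-- ===== LEMMAS AND PROOFS =====
-- abbreviation used only in the proofs
def pvHit (k : String) : Bool := pvAnyInd (PySem.Str.lower k)

theorem if_true_or (a b c : Bool) :
    (if a = true then true else if b = true then true else c) = (a || b || c) := by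
  cases a <;> cases b <;> simp

theorem checkA3_eq (obj : List (String × Int)) :
    checkA3 obj = obj.any (fun kv => pvHit kv.1) := by
  induction obj with
  | nil => rfl
  | cons kv rest ih =>
    obtain ⟨k, v⟩ := kv
    simp only [checkA3, ih, List.any_cons, pvHit]
    cases hk : pvAnyInd (PySem.Str.lower k) <;> simp

theorem level3_eq (v : List (String × Int)) (d : Int) :
    checkNested3 v d = (keysB3 d v).any pvHit := by
  unfold checkNested3 keysB3
  by_cases h : d > 3
  · simp [h, show ¬ d ≤ 3 by omega]
  · simp [h, show d ≤ 3 by omega, checkA3_eq, List.any_flatMap]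

theorem checkA2_eq (d : Int) (obj : List (String × List (String × Int))) :
    checkA2 d obj = obj.any (fun kv => pvHit kv.1 || (keysB3 (d + 1) kv.2).any pvHit) := by
  induction obj with
  | nil => rfl
  | cons kv rest ih =>
    obtain ⟨k, v⟩ := kv
    simp only [checkA2, ih, level3_eq, List.any_cons, pvHit, if_true_or]

theorem level2_eq (v : List (String × List (String × Int))) (d : Int) :
    checkNested2 v d = (keysB2 d v).any pvHit := by
  unfold checkNested2 keysB2
  by_cases h : d > 3
  · simp [h, show ¬ d ≤ 3 by omega]
  · simp [h, show d ≤ 3 by omega, checkA2_eq, List.any_flatMap]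

theorem checkA1_eq (d : Int) (obj : List (String × List (String × List (String × Int)))) :
    checkA1 d obj = obj.any (fun kv => pvHit kv.1 || (keysB2 (d + 1) kv.2).any pvHit) := by
  induction obj with
  | nil => rfl
  | cons kv rest ih =>
    obtain ⟨k, v⟩ := kv
    simp only [checkA1, ih, level2_eq, List.any_cons, pvHit, if_true_or]

theorem level1_eq (v : List (String × List (String × List (String × Int)))) (d : Int) :
    checkNested1 v d = (keysB1 d v).any pvHit := by
  unfold checkNested1 keysB1
  by_cases h : d > 3
  · simp [h, show ¬ d ≤ 3 by omega]
  · simp [h, show d ≤ 3 by omega, checkA1_eq, List.any_flatMap]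

theorem checkA0_eq (d : Int) (obj : List (String × List (String × List (String × List (String × Int))))) :
    checkA0 d obj = obj.any (fun kv => pvHit kv.1 || (keysB1 (d + 1) kv.2).any pvHit) := by
  induction obj with
  | nil => rfl
  | cons kv rest ih =>
    obtain ⟨k, v⟩ := kv
    simp only [checkA0, ih, level1_eq, List.any_cons, pvHit, if_true_or]

theorem level0_eq (v : List (String × List (String × List (String × List (String × Int))))) (d : Int) :
    checkNested0 v d = (keysB0 d v).any pvHit := by
  unfold checkNested0 keysB0
  by_cases h : d > 3
  · simp [h, show ¬ d ≤ 3 by omega]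
  · simp [h, show d ≤ 3 by omega, checkA0_eq, List.any_flatMap]

-- ===== VERDICT (by name: the statement is the Claim_ definition above) =====
theorem has_credential_data_py_spec : Claim_equal_has_credential_data_py := by
  intro config _
  unfold Spec_has_credential_data_py has_credential_data_py has_credential_data_py_alt
  rw [level0_eq]
  rfl
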